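-- pv_equiv track=rewrite | github.com/cbizon/metapath-counts | src/pipeline/compare_grouped_results.py | compare_sorted_lines
-- ===== SOURCE A (Python) =====
-- def compare_sorted_lines(left_lines, right_lines, sample_diff):
--     left_sorted = sorted(left_lines)
--     right_sorted = sorted(right_lines)
--     if left_sorted == right_sorted:
--         return True, []
--
--     diffs = []
--     if sample_diff > 0:
--         i = j = 0
--         while i < len(left_sorted) and j < len(right_sorted) and len(diffs) < sample_diff:
--             if left_sorted[i] == right_sorted[j]:
--                 i += 1
--                 j += 1
--                 continue
--             if left_sorted[i] < right_sorted[j]: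
--                 diffs.append(f"- {left_sorted[i]}")
--                 i += 1
--             else:
--                 diffs.append(f"+ {right_sorted[j]}")
--                 j += 1
--         while i < len(left_sorted) and len(diffs) < sample_diff:
--             diffs.append(f"- {left_sorted[i]}")
--             i += 1
--         while j < len(right_sorted) and len(diffs) < sample_diff:
--             diffs.append(f"+ {right_sorted[j]}")
--             j += 1
--
--     return False, diffs
-- ===== SOURCE B (Python) =====
-- def compare_sorted_lines(left_lines, right_lines, sample_diff):
--     counts = {}
--     for v in left_lines:
--         counts[v] = counts.get(v, 0) + 1
--     for v in right_lines:
--         counts[v] = counts.get(v, 0) - 1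
--     if all(c == 0 for c in counts.values()):
--         return True, []
--     if sample_diff <= 0:
--         return False, []
--     entries = []
--     for v, c in counts.items():
--         if c > 0:
--             entries += [(v, "- ")] * c
--         elif c < 0:
--             entries += [(v, "+ ")] * (-c)
--     entries.sort(key=lambda e: e[0])
--     return False, [sign + v for v, sign in entries[:sample_diff]]
-- ===== Notes on version B (the rewrite author's own statement) =====
-- stated objective: alternative
-- what changed: A sorts both full lists and walks them with a two-pointer merge plus two tail loops, truncating as it appends; B makes one signed-count dictionary pass over both lists (multiset difference), materialises only the excess entries with +/- tags, sorts those by line value and truncates once.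
import Mathlib
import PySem

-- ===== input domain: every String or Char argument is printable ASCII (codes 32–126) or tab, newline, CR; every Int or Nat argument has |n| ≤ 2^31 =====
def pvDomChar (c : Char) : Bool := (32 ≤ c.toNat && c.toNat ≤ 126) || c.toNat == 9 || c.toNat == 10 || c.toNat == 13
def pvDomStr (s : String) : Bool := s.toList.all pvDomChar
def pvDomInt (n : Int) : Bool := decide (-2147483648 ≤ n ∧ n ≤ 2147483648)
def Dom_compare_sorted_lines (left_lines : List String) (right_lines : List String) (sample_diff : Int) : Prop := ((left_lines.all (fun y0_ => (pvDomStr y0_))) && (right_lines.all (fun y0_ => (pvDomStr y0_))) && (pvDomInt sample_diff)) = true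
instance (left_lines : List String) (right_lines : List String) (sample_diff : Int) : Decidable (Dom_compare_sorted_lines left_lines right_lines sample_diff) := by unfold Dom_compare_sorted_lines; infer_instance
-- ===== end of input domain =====

-- B replaces A's two-pointer merge over the two fully sorted lists by a single signed-count
-- dictionary pass; only the excess entries are then sorted and truncated (objective: alternative).

-- ===== PORT A =====
-- the `while i < len(left_sorted) and j < len(right_sorted) and len(diffs) < sample_diff` loop;
-- the index pair (i, j) is carried as the two remaining suffixes, which the loop only consumes
def aMerge : List String → List String → List String → Int → List String × List String × List String
  | x :: ls, y :: rs, diffs, sd =>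
    if (diffs.length : Int) < sd then
      if x = y then aMerge ls rs diffs sd
      else if x < y then aMerge ls (y :: rs) (diffs ++ ["- " ++ x]) sd
      else aMerge (x :: ls) rs (diffs ++ ["+ " ++ y]) sd
    else (x :: ls, y :: rs, diffs)
  | ls, rs, diffs, _ => (ls, rs, diffs)
  termination_by ls rs _ _ => ls.length + rs.length

-- `while i < len(left_sorted) and len(diffs) < sample_diff: diffs.append(f"- {left_sorted[i]}")`
def aTailL : List String → List String → Int → List String
  | x :: ls, diffs, sd =>
    if (diffs.length : Int) < sd then aTailL ls (diffs ++ ["- " ++ x]) sd else diffs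
  | [], diffs, _ => diffs

-- `while j < len(right_sorted) and len(diffs) < sample_diff: diffs.append(f"+ {right_sorted[j]}")`
def aTailR : List String → List String → Int → List String
  | y :: rs, diffs, sd =>
    if (diffs.length : Int) < sd then aTailR rs (diffs ++ ["+ " ++ y]) sd else diffs
  | [], diffs, _ => diffs

def compare_sorted_lines (left_lines : List String) (right_lines : List String) (sample_diff : Int) : Bool × List String :=
  let left_sorted := PySem.List.sorted left_lines (fun x => x) false
  let right_sorted := PySem.List.sorted right_lines (fun x => x) false
  if left_sorted = right_sorted then (true, [])
  else
    let diffs :=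
      if sample_diff > 0 then
        match aMerge left_sorted right_sorted [] sample_diff with
        | (ls', rs', d) => aTailR rs' (aTailL ls' d sample_diff) sample_diff
      else []
    (false, diffs)

-- ===== PORT B =====
-- the two counting loops: counts[v] = counts.get(v, 0) + 1 over left, then - 1 over right
def bCounts (left_lines : List String) (right_lines : List String) : PySem.Dict String Int :=
  right_lines.foldl (fun d v => d.insert v (d.getD v 0 - 1))
    (left_lines.foldl (fun d v => d.insert v (d.getD v 0 + 1)) PySem.Dict.empty)

def compare_sorted_lines_alt (left_lines : List String) (right_lines : List String) (sample_diff : Int) : Bool × List String :=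
  let counts := bCounts left_lines right_lines
  if counts.values.all (fun c => c == 0) then (true, [])
  else if sample_diff ≤ 0 then (false, [])
  else
    let entries := counts.items.foldl (fun acc p =>
      if p.2 > 0 then acc ++ List.replicate p.2.toNat (p.1, "- ")
      else if p.2 < 0 then acc ++ List.replicate (-p.2).toNat (p.1, "+ ") else acc) []
    let es := PySem.List.sorted entries (fun e => e.1) false
    (false, (es.take sample_diff.toNat).map (fun e => e.2 ++ e.1))

-- ===== PRECONDITION & SPEC =====
def Spec_compare_sorted_lines (left_lines : List String) (right_lines : List String) (sample_diff : Int) (out : Bool × List String) : Prop := out = compare_sorted_lines_alt left_lines right_lines sample_diff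
instance (left_lines : List String) (right_lines : List String) (sample_diff : Int) (out : Bool × List String) : Decidable (Spec_compare_sorted_lines left_lines right_lines sample_diff out) := by unfold Spec_compare_sorted_lines; infer_instance

-- ===== CLAIM (what is proved, stated in full; the proofs are below) =====
def Claim_equal_compare_sorted_lines : Prop := ∀ (left_lines : List String) (right_lines : List String) (sample_diff : Int), Dom_compare_sorted_lines left_lines right_lines sample_diff → Spec_compare_sorted_lines left_lines right_lines sample_diff (compare_sorted_lines left_lines right_lines sample_diff)

-- ===== LEMMAS AND PROOFS =====

-- the full, untruncated diff of two sorted lists, as (value, sign) pairs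
def diffPairs : List String → List String → List (String × String)
  | [], ys => ys.map (fun y => (y, "+ "))
  | x :: xs, [] => (x :: xs).map (fun x => (x, "- "))
  | x :: xs, y :: ys =>
    if x = y then diffPairs xs ys
    else if x < y then (x, "- ") :: diffPairs xs (y :: ys)
    else (y, "+ ") :: diffPairs (x :: xs) ys
  termination_by xs ys => xs.length + ys.length

def tagStr (e : String × String) : String := e.2 ++ e.1

-- the per-item block of B's entries list
def entryBlock (p : String × Int) : List (String × String) :=
  if p.2 > 0 then List.replicate p.2.toNat (p.1, "- ")
  else if p.2 < 0 then List.replicate (-p.2).toNat (p.1, "+ ") else []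

-- ---- A-side: the three loops compute (map tagStr (diffPairs ls rs)).take (sd.toNat - |diffs|)
theorem aTailL_eq (sd : Int) (k : Nat) (hk : k = sd.toNat) (hsd : 0 < sd) :
    ∀ (ls diffs : List String),
      aTailL ls diffs sd = diffs ++ ((ls.map (fun x => "- " ++ x)).take (k - diffs.length)) := by
  intro ls
  induction ls with
  | nil => intro diffs; simp [aTailL]
  | cons x ls ih =>
    intro diffs
    rw [aTailL]
    by_cases h : (diffs.length : Int) < sd
    · rw [if_pos h, ih]
      have hlt : diffs.length < k := by omega
      obtain ⟨m, hm⟩ : ∃ m, k - diffs.length = m + 1 := ⟨k - diffs.length - 1, by omega⟩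
      simp [hm]
      omega
    · rw [if_neg h]
      have : k - diffs.length = 0 := by omega
      simp [this]

theorem aTailR_eq (sd : Int) (k : Nat) (hk : k = sd.toNat) (hsd : 0 < sd) :
    ∀ (rs diffs : List String),
      aTailR rs diffs sd = diffs ++ ((rs.map (fun y => "+ " ++ y)).take (k - diffs.length)) := by
  intro rs
  induction rs with
  | nil => intro diffs; simp [aTailR]
  | cons y rs ih =>
    intro diffs
    rw [aTailR]
    by_cases h : (diffs.length : Int) < sd
    · rw [if_pos h, ih]
      have hlt : diffs.length < k := by omega
      obtain ⟨m, hm⟩ : ∃ m, k - diffs.length = m + 1 := ⟨k - diffs.length - 1, by omega⟩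
      simp [hm]
      omega
    · rw [if_neg h]
      have : k - diffs.length = 0 := by omega
      simp [this]

theorem aRun_eq (sd : Int) (k : Nat) (hk : k = sd.toNat) (hsd : 0 < sd) :
    ∀ (n : Nat) (ls rs diffs : List String), ls.length + rs.length ≤ n →
      (match aMerge ls rs diffs sd with
       | (ls', rs', d) => aTailR rs' (aTailL ls' d sd) sd) =
      diffs ++ (((diffPairs ls rs).map tagStr).take (k - diffs.length)) := by
  intro n
  induction n with
  | zero =>
    intro ls rs diffs hn
    have hls : ls = [] := by cases ls <;> simp_all
    have hrs : rs = [] := by cases rs <;> simp_all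
    subst hls hrs
    simp [aMerge, aTailL, aTailR, diffPairs]
  | succ n ih =>
    intro ls rs diffs hn
    match ls, rs with
    | [], rs =>
      simp only [aMerge]
      rw [show aTailL [] diffs sd = diffs from rfl]
      rw [aTailR_eq sd k hk hsd]
      simp [diffPairs, tagStr, List.map_map, Function.comp_def]
    | x :: ls, [] =>
      simp only [aMerge]
      rw [show aTailR [] (aTailL (x :: ls) diffs sd) sd = aTailL (x :: ls) diffs sd from rfl]
      rw [aTailL_eq sd k hk hsd]
      simp [diffPairs, tagStr, List.map_map, Function.comp_def]
    | x :: ls, y :: rs =>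
      rw [aMerge]
      by_cases hlen : (diffs.length : Int) < sd
      · rw [if_pos hlen]
        by_cases hxy : x = y
        · rw [if_pos hxy]
          rw [ih ls rs diffs (by simp at hn ⊢; omega)]
          rw [diffPairs, if_pos hxy]
        · rw [if_neg hxy]
          by_cases hlt : x < y
          · rw [if_pos hlt]
            rw [ih ls (y :: rs) (diffs ++ ["- " ++ x]) (by simp at hn ⊢; omega)]
            rw [diffPairs, if_neg hxy, if_pos hlt]
            have hlk : diffs.length < k := by omega
            obtain ⟨m, hm⟩ : ∃ m, k - diffs.length = m + 1 := ⟨k - diffs.length - 1, by omega⟩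
            simp [hm, tagStr]
            omega
          · rw [if_neg hlt]
            rw [ih (x :: ls) rs (diffs ++ ["+ " ++ y]) (by simp at hn ⊢; omega)]
            rw [diffPairs, if_neg hxy, if_neg hlt]
            have hlk : diffs.length < k := by omega
            obtain ⟨m, hm⟩ : ∃ m, k - diffs.length = m + 1 := ⟨k - diffs.length - 1, by omega⟩
            simp [hm, tagStr]
            omega
      · rw [if_neg hlen]
        have h0 : k - diffs.length = 0 := by omega
        show aTailR (y :: rs) (aTailL (x :: ls) diffs sd) sd = _
        rw [show aTailL (x :: ls) diffs sd = diffs by rw [aTailL, if_neg hlen]]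
        rw [show aTailR (y :: rs) diffs sd = diffs by rw [aTailR, if_neg hlen]]
        simp [h0]

-- ---- order and multiplicity facts about diffPairs
theorem fst_mem_of_mem_diffPairs : ∀ (xs ys : List String) (e : String × String),
    e ∈ diffPairs xs ys → e.1 ∈ xs ∨ e.1 ∈ ys := by
  intro xs ys
  induction xs, ys using diffPairs.induct with
  | case1 ys => intro e he; simp [diffPairs] at he; obtain ⟨y, hy, rfl⟩ := he; simp [hy]
  | case2 x xs =>
    intro e he; simp [diffPairs] at he
    rcases he with h | ⟨a, ha, h⟩
    · subst h; simp
    · subst h; simp [ha]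
  | case3 xs y ys ih =>
    intro e he
    rw [diffPairs, if_pos rfl] at he
    rcases ih e he with h | h <;> simp [h]
  | case4 x xs y ys hxy hlt ih =>
    intro e he
    rw [diffPairs, if_neg hxy, if_pos hlt] at he
    rcases List.mem_cons.1 he with rfl | he
    · simp
    · rcases ih e he with h | h <;> simp [h]
  | case5 x xs y ys hxy hlt ih =>
    intro e he
    rw [diffPairs, if_neg hxy, if_neg hlt] at he
    rcases List.mem_cons.1 he with rfl | he
    · simp
    · rcases ih e he with h | h <;> simp [h]

theorem snd_mem_of_mem_diffPairs : ∀ (xs ys : List String) (e : String × String),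
    e ∈ diffPairs xs ys → e.2 = "- " ∨ e.2 = "+ " := by
  intro xs ys
  induction xs, ys using diffPairs.induct with
  | case1 ys => intro e he; simp [diffPairs] at he; obtain ⟨y, hy, rfl⟩ := he; simp
  | case2 x xs =>
    intro e he; simp [diffPairs] at he
    rcases he with h | ⟨a, ha, h⟩ <;> (subst h; simp)
  | case3 xs y ys ih =>
    intro e he; rw [diffPairs, if_pos rfl] at he; exact ih e he
  | case4 x xs y ys hxy hlt ih =>
    intro e he; rw [diffPairs, if_neg hxy, if_pos hlt] at he
    rcases List.mem_cons.1 he with rfl | he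
    · simp
    · exact ih e he
  | case5 x xs y ys hxy hlt ih =>
    intro e he; rw [diffPairs, if_neg hxy, if_neg hlt] at he
    rcases List.mem_cons.1 he with rfl | he
    · simp
    · exact ih e he

theorem diffPairs_pairwise : ∀ (xs ys : List String),
    xs.Pairwise (· ≤ ·) → ys.Pairwise (· ≤ ·) →
    (diffPairs xs ys).Pairwise (fun a b => a.1 ≤ b.1) := by
  intro xs ys
  induction xs, ys using diffPairs.induct with
  | case1 ys =>
    intro _ hy
    rw [diffPairs]
    exact (List.pairwise_map).2 (hy.imp (fun h => h))
  | case2 x xs =>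
    intro hx _
    rw [diffPairs]
    exact (List.pairwise_map).2 (hx.imp (fun h => h))
  | case3 xs y ys ih =>
    intro hx hy
    rw [diffPairs, if_pos rfl]
    exact ih hx.of_cons hy.of_cons
  | case4 x xs y ys hxy hlt ih =>
    intro hx hy
    rw [diffPairs, if_neg hxy, if_pos hlt]
    refine List.pairwise_cons.2 ⟨?_, ih hx.of_cons hy⟩
    intro e he
    rcases fst_mem_of_mem_diffPairs _ _ e he with h | h
    · exact (List.pairwise_cons.1 hx).1 e.1 h
    · rcases List.mem_cons.1 h with h | h
      · exact le_of_lt (h ▸ hlt)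
      · exact le_of_lt (lt_of_lt_of_le hlt ((List.pairwise_cons.1 hy).1 e.1 h))
  | case5 x xs y ys hxy hlt ih =>
    intro hx hy
    rw [diffPairs, if_neg hxy, if_neg hlt]
    have hyx : y < x := lt_of_le_of_ne (le_of_not_gt hlt) (fun h => hxy h.symm)
    refine List.pairwise_cons.2 ⟨?_, ih hx hy.of_cons⟩
    intro e he
    rcases fst_mem_of_mem_diffPairs _ _ e he with h | h
    · rcases List.mem_cons.1 h with h | h
      · exact le_of_lt (h ▸ hyx)
      · exact le_of_lt (lt_of_lt_of_le hyx ((List.pairwise_cons.1 hx).1 e.1 h))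
    · exact (List.pairwise_cons.1 hy).1 e.1 h

theorem count_map_pair (sign : String) (l : List String) (v s : String) :
    (l.map (fun y => (y, sign))).count (v, s) = if s = sign then l.count v else 0 := by
  induction l with
  | nil => simp
  | cons a l ih =>
    simp only [List.map_cons, List.count_cons, ih]
    by_cases hs : s = sign <;> by_cases hv : v = a <;>
      simp [hs, hv, Prod.ext_iff] <;> tauto

theorem count_head_lt_eq_zero (x y : String) (ys : List String) (hy : (y :: ys).Pairwise (· ≤ ·))
    (hlt : x < y) : (y :: ys).count x = 0 := by
  rw [List.count_eq_zero]
  intro hmem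
  rcases List.mem_cons.1 hmem with rfl | h
  · exact absurd hlt (lt_irrefl x)
  · exact absurd (lt_of_lt_of_le hlt ((List.pairwise_cons.1 hy).1 x h)) (lt_irrefl x)

theorem count_diffPairs : ∀ (xs ys : List String),
    xs.Pairwise (· ≤ ·) → ys.Pairwise (· ≤ ·) → ∀ v : String,
    (diffPairs xs ys).count (v, "- ") = xs.count v - ys.count v ∧
    (diffPairs xs ys).count (v, "+ ") = ys.count v - xs.count v := by
  intro xs ys
  induction xs, ys using diffPairs.induct with
  | case1 ys =>
    intro _ _ v
    rw [diffPairs]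
    simp [count_map_pair]
  | case2 x xs =>
    intro _ _ v
    rw [diffPairs, count_map_pair, count_map_pair]
    simp
  | case3 xs y ys ih =>
    intro hx hy v
    rw [diffPairs, if_pos rfl]
    obtain ⟨h1, h2⟩ := ih hx.of_cons hy.of_cons v
    simp only [List.count_cons, h1, h2]
    constructor <;> split_ifs <;> simp_all
  | case4 x xs y ys hxy hlt ih =>
    intro hx hy v
    obtain ⟨h1, h2⟩ := ih hx.of_cons hy v
    have hz : (y :: ys).count x = 0 := count_head_lt_eq_zero x y ys hy hlt
    rw [diffPairs, if_neg hxy, if_pos hlt]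
    simp only [List.count_cons, h1, h2, List.count_cons]
    simp only [List.count_cons] at hz ⊢
    by_cases hv : v = x <;>
      simp [Prod.ext_iff, hv] <;> split_ifs <;> simp_all
  | case5 x xs y ys hxy hlt ih =>
    intro hx hy v
    have hyx : y < x := lt_of_le_of_ne (le_of_not_gt hlt) (fun h => hxy h.symm)
    obtain ⟨h1, h2⟩ := ih hx hy.of_cons v
    have hz : (x :: xs).count y = 0 := count_head_lt_eq_zero y x xs hx hyx
    rw [diffPairs, if_neg hxy, if_neg hlt]
    simp only [List.count_cons, h1, h2, List.count_cons]
    simp only [List.count_cons] at hz ⊢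
    by_cases hv : v = y <;>
      simp [Prod.ext_iff, hv] <;> split_ifs <;> simp_all

-- ---- a Pairwise-≤-by-key list with no distinct elements sharing a key is determined by its multiset
theorem eq_of_perm_pairwise_keyuniq {α : Type} (key : α → String) :
    ∀ (xs ys : List α), xs.Perm ys →
      xs.Pairwise (fun a b => key a ≤ key b) → ys.Pairwise (fun a b => key a ≤ key b) →
      (∀ a ∈ xs, ∀ b ∈ xs, key a = key b → a = b) → xs = ys := by
  intro xs
  induction xs with
  | nil => intro ys hp _ _ _; exact (hp.nil_eq).symm ▸ rfl
  | cons a xs ih =>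
    intro ys hp hx hy hk
    cases ys with
    | nil => exact absurd hp.symm (by simp)
    | cons b ys =>
      have hab : a = b := by
        have hbmem : b ∈ a :: xs := hp.symm.subset (List.mem_cons_self)
        have hamem : a ∈ b :: ys := hp.subset (List.mem_cons_self)
        have h1 : key a ≤ key b := by
          rcases List.mem_cons.1 hbmem with h | h
          · exact le_of_eq (congrArg key h.symm)
          · exact (List.pairwise_cons.1 hx).1 b h
        have h2 : key b ≤ key a := by
          rcases List.mem_cons.1 hamem with h | h
          · exact le_of_eq (congrArg key h.symm)
          · exact (List.pairwise_cons.1 hy).1 a h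
        exact hk a List.mem_cons_self b hbmem (le_antisymm h1 h2)
      subst hab
      have hp' : xs.Perm ys := hp.cons_inv
      rw [ih ys hp' hx.of_cons hy.of_cons
        (fun x hx' y hy' => hk x (List.mem_cons_of_mem _ hx') y (List.mem_cons_of_mem _ hy'))]

-- ---- B-side: the counts dictionary and the entries list
theorem getD_foldl_insert_sub_one (l : List String) :
    ∀ (d : PySem.Dict String Int) (v : String),
      (l.foldl (fun d x => d.insert x (d.getD x 0 - 1)) d).getD v 0 = d.getD v 0 - l.count v := by
  induction l with
  | nil => intro d v; simp
  | cons x l ih =>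
    intro d v
    simp only [List.foldl_cons, ih, PySem.Dict.getD_insert, List.count_cons]
    by_cases hv : v = x
    · simp [hv]; omega
    · have hvx : ¬ x = v := fun h => hv h.symm
      simp [hv, hvx]

theorem bCounts_getD (L R : List String) (v : String) :
    (bCounts L R).getD v 0 = (L.count v : Int) - (R.count v : Int) := by
  unfold bCounts
  rw [getD_foldl_insert_sub_one, PySem.Dict.foldl_insert_getD_add_one_eq_counter,
    PySem.Dict.getD_counter]

theorem bCounts_nodup (L R : List String) : (bCounts L R).keys.Nodup := by
  unfold bCounts
  exact PySem.Dict.nodup_keys_foldl_insert _ _ _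
    (PySem.Dict.nodup_keys_foldl_insert _ _ _ PySem.Dict.nodup_keys_empty)

-- the per-item block of entries

theorem keys_eq_items_map_fst (d : PySem.Dict String Int) : d.keys = d.items.map Prod.fst := by
  simp only [PySem.Dict.keys]

theorem bCounts_mem_items (L R : List String) (v : String) (c : Int)
    (h : (v, c) ∈ (bCounts L R).items) : c = (L.count v : Int) - (R.count v : Int) := by
  have := PySem.Dict.getD_of_mem_items (h := h) (hnd := bCounts_nodup L R) (d0 := 0)
  rw [bCounts_getD] at this
  exact this.symm

theorem mem_entryBlock (p : String × Int) (e : String × String) (he : e ∈ entryBlock p) :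
    e.1 = p.1 ∧ (e.2 = "- " ∨ e.2 = "+ ") ∧ e = (p.1, e.2) := by
  unfold entryBlock at he
  split_ifs at he
  · simp [List.eq_of_mem_replicate he]
  · simp [List.eq_of_mem_replicate he]
  · simp at he

theorem entries_eq_flatMap (items : List (String × Int)) :
    items.foldl (fun acc p =>
      if p.2 > 0 then acc ++ List.replicate p.2.toNat (p.1, "- ")
      else if p.2 < 0 then acc ++ List.replicate (-p.2).toNat (p.1, "+ ") else acc) [] =
    items.flatMap entryBlock := by
  rw [PySem.List.foldl_congr_mem (g := fun acc p => acc ++ entryBlock p)]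
  · rw [PySem.List.foldl_append_eq_flatMap]; simp
  · intro acc p _
    unfold entryBlock
    split_ifs <;> simp

theorem count_flatMap_zero (l : List (String × Int)) (v s : String)
    (hv : v ∉ l.map Prod.fst) : (l.flatMap entryBlock).count (v, s) = 0 := by
  rw [List.count_eq_zero]
  intro hmem
  obtain ⟨p, hp, he⟩ := List.mem_flatMap.1 hmem
  exact hv (List.mem_map.2 ⟨p, hp, ((mem_entryBlock p _ he).1).symm⟩)

theorem count_flatMap_mem (l : List (String × Int)) (v s : String) (c : Int)
    (hnd : (l.map Prod.fst).Nodup) (hmem : (v, c) ∈ l) :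
    (l.flatMap entryBlock).count (v, s) = (entryBlock (v, c)).count (v, s) := by
  induction l with
  | nil => simp at hmem
  | cons p l ih =>
    simp only [List.flatMap_cons, List.count_append]
    rcases List.mem_cons.1 hmem with h | h
    · subst h
      rw [count_flatMap_zero l v s (by simpa using (List.nodup_cons.1 hnd).1)]
      simp
    · have hne : p.1 ≠ v := by
        intro hpv
        exact (List.nodup_cons.1 hnd).1 (hpv ▸ List.mem_map.2 ⟨(v, c), h, hpv ▸ rfl⟩)
      have : (entryBlock p).count (v, s) = 0 := by
        rw [List.count_eq_zero]
        intro hm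
        exact hne ((mem_entryBlock p _ hm).1 ▸ rfl)
      rw [this, ih (List.nodup_cons.1 hnd).2 h, Nat.zero_add]

theorem count_bEntries (L R : List String) (v s : String) :
    ((bCounts L R).items.flatMap entryBlock).count (v, s) =
      (entryBlock (v, (L.count v : Int) - (R.count v : Int))).count (v, s) := by
  by_cases hv : v ∈ (bCounts L R).keys
  · rw [keys_eq_items_map_fst] at hv
    obtain ⟨p, hp, hfst⟩ := List.mem_map.1 hv
    obtain ⟨w, c⟩ := p
    rw [show w = v from hfst] at hp
    have hc : c = (L.count v : Int) - (R.count v : Int) := bCounts_mem_items L R v c hp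
    subst hc
    exact count_flatMap_mem _ v s _ (by rw [← keys_eq_items_map_fst]; exact bCounts_nodup L R) hp
  · rw [count_flatMap_zero _ v s (by rw [← keys_eq_items_map_fst]; exact hv)]
    have hz : (bCounts L R).getD v 0 = 0 := by
      apply PySem.Dict.getD_of_not_contains
      rw [PySem.Dict.contains_eq_decide_mem_keys]
      simpa using hv
    rw [bCounts_getD] at hz
    rw [hz]
    simp [entryBlock]

theorem count_entryBlock (v s : String) (c : Int) :
    (entryBlock (v, c)).count (v, s) =
      if s = "- " then c.toNat else if s = "+ " then (-c).toNat else 0 := by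
  unfold entryBlock
  simp only
  by_cases h1 : c > 0
  · rw [if_pos h1, List.count_replicate]
    simp only [beq_iff_eq, Prod.mk.injEq, true_and]
    by_cases hs : s = "- "
    · subst hs; simp
    · rw [if_neg (fun h => hs h.symm), if_neg hs]
      by_cases hs2 : s = "+ "
      · rw [if_pos hs2]; omega
      · rw [if_neg hs2]
  · rw [if_neg h1]
    by_cases h2 : c < 0
    · rw [if_pos h2, List.count_replicate]
      simp only [beq_iff_eq, Prod.mk.injEq, true_and]
      by_cases hs : s = "+ "
      · subst hs
        rw [if_pos rfl, if_neg (by decide)]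
      · rw [if_neg (fun h => hs h.symm), if_neg hs]
        by_cases hs3 : s = "- "
        · rw [if_pos hs3]; omega
        · rw [if_neg hs3]
    · rw [if_neg h2]
      simp
      split_ifs <;> omega

theorem values_all_zero_iff (L R : List String) :
    ((bCounts L R).values.all (fun c => c == 0)) = true ↔
      ∀ v, (L.count v : Int) - (R.count v : Int) = 0 := by
  constructor
  · intro h v
    rw [← bCounts_getD]
    by_cases hv : v ∈ (bCounts L R).keys
    · rw [PySem.Dict.values_eq_map_keys _ (bCounts_nodup L R) 0] at h
      have := List.all_eq_true.1 h _ (List.mem_map.2 ⟨v, hv, rfl⟩)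
      simpa using this
    · apply PySem.Dict.getD_of_not_contains
      rw [PySem.Dict.contains_eq_decide_mem_keys]
      simpa using hv
  · intro h
    rw [PySem.Dict.values_eq_map_keys _ (bCounts_nodup L R) 0]
    apply List.all_eq_true.2
    intro c hc
    obtain ⟨v, _, rfl⟩ := List.mem_map.1 hc
    rw [bCounts_getD]
    simpa using h v

-- ===== VERDICT (by name: the statement is the Claim_ definition above) =====
set_option maxHeartbeats 1600000 in
theorem compare_sorted_lines_spec : Claim_equal_compare_sorted_lines := by
  intro L0 R0 sd _
  simp only [Spec_compare_sorted_lines, compare_sorted_lines, compare_sorted_lines_alt]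
  set L := PySem.List.sorted L0 (fun x => x) false with hLdef
  set R := PySem.List.sorted R0 (fun x => x) false with hRdef
  have hLperm : L.Perm L0 := PySem.List.sorted_perm L0 (fun x => x) false
  have hRperm : R.Perm R0 := PySem.List.sorted_perm R0 (fun x => x) false
  have hcnt_iff : ((bCounts L0 R0).values.all (fun c => c == 0)) = true ↔ L = R := by
    rw [values_all_zero_iff]
    constructor
    · intro h
      rw [hLdef, hRdef, PySem.List.sorted_id_eq_sorted_id_iff_perm, List.perm_iff_count]
      intro v
      have := h v
      omega
    · intro h
      rw [hLdef, hRdef, PySem.List.sorted_id_eq_sorted_id_iff_perm] at h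
      intro v
      rw [h.count_eq v]
      omega
  by_cases hEq : L = R
  · rw [if_pos hEq, if_pos (hcnt_iff.2 hEq)]
  · have hBfalse : ¬(((bCounts L0 R0).values.all fun c => c == 0) = true) :=
      fun h => hEq (hcnt_iff.1 h)
    rw [if_neg hEq, if_neg hBfalse]
    by_cases hsd : sd > 0
    · have hsd2 : ¬ sd ≤ 0 := by omega
      rw [if_pos hsd, if_neg hsd2]
      -- the sorted entries list equals diffPairs L R
      set entries := ((bCounts L0 R0).items.foldl (fun acc p =>
        if p.2 > 0 then acc ++ List.replicate p.2.toNat (p.1, "- ")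
        else if p.2 < 0 then acc ++ List.replicate (-p.2).toNat (p.1, "+ ") else acc) []) with hEdef
    
      have hEflat : entries = (bCounts L0 R0).items.flatMap entryBlock := entries_eq_flatMap _
      have hLpw : L.Pairwise (· ≤ ·) := by
        have := PySem.List.sorted_pairwise (xs := L0) (key := fun x => x)
        simpa using this
      have hRpw : R.Pairwise (· ≤ ·) := by
        have := PySem.List.sorted_pairwise (xs := R0) (key := fun x => x)
        simpa using this
      have hcount : ∀ e : String × String, entries.count e = (diffPairs L R).count e := by
        intro ⟨v, s⟩
        rw [hEflat, count_bEntries, count_entryBlock]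
        by_cases hs1 : s = "- "
        · subst hs1
          rw [(count_diffPairs L R hLpw hRpw v).1, hLperm.count_eq, hRperm.count_eq]
          simp
        · by_cases hs2 : s = "+ "
          · subst hs2
            rw [(count_diffPairs L R hLpw hRpw v).2, hLperm.count_eq, hRperm.count_eq]
            simp [hs1]
          · rw [if_neg hs1, if_neg hs2]
            symm
            rw [List.count_eq_zero]
            intro hmem
            rcases snd_mem_of_mem_diffPairs L R (v, s) hmem with h | h
            · exact hs1 h
            · exact hs2 h
      have hperm : entries.Perm (diffPairs L R) := List.perm_iff_count.2 hcount
      have hkeyuniq : ∀ a ∈ PySem.List.sorted entries (fun e => e.1) false,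
          ∀ b ∈ PySem.List.sorted entries (fun e => e.1) false, a.1 = b.1 → a = b := by
        intro a ha b hb hab
        rw [PySem.List.mem_sorted] at ha hb
        rw [hEflat] at ha hb
        obtain ⟨p, hp, hap⟩ := List.mem_flatMap.1 ha
        obtain ⟨q, hq, hbq⟩ := List.mem_flatMap.1 hb
        have hnd : ((bCounts L0 R0).items.map Prod.fst).Nodup := by
          rw [← keys_eq_items_map_fst]; exact bCounts_nodup L0 R0
        have hpq : p = q := by
          apply List.inj_on_of_nodup_map hnd hp hq
          rw [(mem_entryBlock p a hap).1.symm, (mem_entryBlock q b hbq).1.symm, hab]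
        subst hpq
        unfold entryBlock at hap hbq
        split_ifs at hap hbq
        · exact (List.eq_of_mem_replicate hap).trans (List.eq_of_mem_replicate hbq).symm
        · exact (List.eq_of_mem_replicate hap).trans (List.eq_of_mem_replicate hbq).symm
        · exact absurd hap (List.not_mem_nil)
      have hes : PySem.List.sorted entries (fun e => e.1) false = diffPairs L R := by
        apply eq_of_perm_pairwise_keyuniq (fun e => e.1)
        · exact (PySem.List.sorted_perm entries (fun e => e.1) false).trans hperm
        · have := PySem.List.sorted_pairwise (xs := entries) (key := fun e => e.1)
          simpa using this
        · exact diffPairs_pairwise L R hLpw hRpw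
        · exact hkeyuniq
      rw [hes]
      have hrun := aRun_eq sd sd.toNat rfl hsd (L.length + R.length) L R [] le_rfl
      rw [show (match aMerge L R [] sd with
            | (ls', rs', d) => aTailR rs' (aTailL ls' d sd) sd)
          = aTailR (aMerge L R [] sd).2.1 (aTailL (aMerge L R [] sd).1 (aMerge L R [] sd).2.2 sd) sd
          from rfl] at hrun
      rw [hrun]
      simp [List.map_take]
      rfl
    · have hsd2 : sd ≤ 0 := by omega
      rw [if_neg hsd, if_pos hsd2]
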